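-- pv_equiv track=rewrite | github.com/jelisaaa/240612_Programming-for-Developers | Questions/1b.py | segment_keywords
-- ===== SOURCE A (Python) =====
-- def segment_keywords(user_query, marketing_keywords_dictionary):
--     word_set = set(marketing_keywords_dictionary)
--     memo = {}
--
--     def dfs(start):
--
--         if start in memo:
--             return memo[start]
--
--         results = []
--
--         if start == len(user_query):
--             return [""]
--
--         for end in range(start + 1, len(user_query) + 1):
--             word = user_query[start:end]
--             if word in word_set:
--
--                 subsequences = dfs(end)
--                 for seq in subsequences:
--
--                     if seq == "":
--                         results.append(word)
--                     else:
--                         results.append(word + " " + seq)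
--
--         memo[start] = results
--         return results
--
--
--     return dfs(0)
-- ===== SOURCE B (Python) =====
-- def segment_keywords(user_query, marketing_keywords_dictionary):
--     word_set = set(marketing_keywords_dictionary)
--     n = len(user_query)
--     # bottom-up DP over segmentations kept as LISTS OF WORDS; joined once at the end
--     dp = [None] * (n + 1)
--     dp[n] = [[]]
--     for start in range(n - 1, -1, -1):
--         dp[start] = [
--             [user_query[start:end]] + seg
--             for end in range(start + 1, n + 1)
--             if user_query[start:end] in word_set
--             for seg in dp[end]
--         ]
--     return [" ".join(seg) for seg in dp[0]]
-- ===== Notes on version B (the rewrite author's own statement) =====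
-- stated objective: alternative
-- what changed: Replaces the memoized top-down recursion that builds joined strings on the way back with an explicit bottom-up DP table filled right-to-left whose entries are segmentations as lists of words, joined with ' ' only once at the end.
import Mathlib
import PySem

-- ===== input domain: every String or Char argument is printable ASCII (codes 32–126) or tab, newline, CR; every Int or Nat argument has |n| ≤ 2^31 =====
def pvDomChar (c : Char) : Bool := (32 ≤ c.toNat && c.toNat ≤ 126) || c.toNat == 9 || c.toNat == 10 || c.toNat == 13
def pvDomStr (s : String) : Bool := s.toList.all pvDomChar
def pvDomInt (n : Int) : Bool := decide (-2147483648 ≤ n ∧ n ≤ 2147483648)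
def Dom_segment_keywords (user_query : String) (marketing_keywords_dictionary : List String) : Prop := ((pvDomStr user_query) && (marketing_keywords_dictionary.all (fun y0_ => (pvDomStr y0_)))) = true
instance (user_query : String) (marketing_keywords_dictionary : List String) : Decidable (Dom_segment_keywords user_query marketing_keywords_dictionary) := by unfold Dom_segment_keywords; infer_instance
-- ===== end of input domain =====

-- B rewrites A's memoized top-down recursion (strings joined on the way back) as a bottom-up
-- DP table of segmentations kept as lists of words, joined once at the end; same output, same cost.

-- ===== PORT A =====
-- dfs of A, without the memo cache: the cache only memoizes a pure function, the values are identical.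
-- `for end in range(start+1, len(q)+1)` is iterated via the offset j = end-(start+1) ∈ range(len(q)-start),
-- exact for these non-negative bounds; `q[start:end]` is PySem.Str.slice with the same bounds.
def pvDfsA (q : String) (ws : PySem.Set String) (start : Nat) : List String :=
  if start = q.toList.length then [""]
  else
    (List.range (q.toList.length - start)).attach.foldl
      (fun results j =>
        let e := start + 1 + j.1
        let word := PySem.Str.slice q (some (start : Int)) (some (e : Int))
        if ws.contains word then
          results ++ (pvDfsA q ws e).map (fun seq => if seq == "" then word else word ++ " " ++ seq)
        else results) []
termination_by q.toList.length - start
decreasing_by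
  have := List.mem_range.mp j.2; omega

def segment_keywords (user_query : String) (marketing_keywords_dictionary : List String) : List String :=
  let word_set := PySem.Set.ofList marketing_keywords_dictionary
  pvDfsA user_query word_set 0

-- ===== PORT B =====
-- pvBuildB q ws k = the dp table rows for positions len-k … len (head = dp[len-k]); built right-to-left.
def pvBuildB (q : String) (ws : PySem.Set String) : Nat → List (List (List String))
  | 0 => [[[]]]
  | k+1 =>
    let tbl := pvBuildB q ws k
    let start := q.toList.length - (k+1)
    let row := (List.range (k+1)).flatMap (fun j =>
      let e := start + 1 + j
      let word := PySem.Str.slice q (some (start : Int)) (some (e : Int))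
      if ws.contains word then (tbl.getD j []).map (fun seg => word :: seg) else [])
    row :: tbl

def segment_keywords_alt (user_query : String) (marketing_keywords_dictionary : List String) : List String :=
  let word_set := PySem.Set.ofList marketing_keywords_dictionary
  let dp := pvBuildB user_query word_set user_query.toList.length
  (dp.headD []).map (fun seg => PySem.Str.join " " seg)

-- ===== PRECONDITION & SPEC =====
def Spec_segment_keywords (user_query : String) (marketing_keywords_dictionary : List String) (out : List String) : Prop := out = segment_keywords_alt user_query marketing_keywords_dictionary
instance (user_query : String) (marketing_keywords_dictionary : List String) (out : List String) : Decidable (Spec_segment_keywords user_query marketing_keywords_dictionary out) := by unfold Spec_segment_keywords; infer_instance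

-- ===== CLAIM (what is proved, stated in full; the proofs are below) =====
def Claim_equal_segment_keywords : Prop := ∀ (user_query : String) (marketing_keywords_dictionary : List String), Dom_segment_keywords user_query marketing_keywords_dictionary → Spec_segment_keywords user_query marketing_keywords_dictionary (segment_keywords user_query marketing_keywords_dictionary)

-- ===== LEMMAS AND PROOFS =====

-- The common mathematical content: segmentations of q[start:] as lists of words, in A's order.
def pvSegs (q : String) (ws : PySem.Set String) (start : Nat) : List (List String) :=
  if start = q.toList.length then [[]]
  else
    (List.range (q.toList.length - start)).attach.flatMap (fun j =>
      let e := start + 1 + j.1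
      let word := PySem.Str.slice q (some (start : Int)) (some (e : Int))
      if ws.contains word then (pvSegs q ws e).map (fun seg => word :: seg) else [])
termination_by q.toList.length - start
decreasing_by
  have := List.mem_range.mp j.2; omega

theorem pv_attach_flatMap {α β : Type} (l : List α) (g : α → List β) :
    l.attach.flatMap (fun x => g x.1) = l.flatMap g := by
  conv_rhs => rw [← List.attach_map_subtype_val l]
  rw [List.flatMap_map]

theorem pv_foldl_if_append {α β : Type} (m : List α) (P : α → Bool) (F : α → List β) :
    ∀ init : List β,
      m.foldl (fun res x => if P x then res ++ F x else res) init
        = init ++ m.flatMap (fun x => if P x then F x else []) := by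
  induction m with
  | nil => intro init; simp
  | cons a t ih =>
    intro init
    simp only [List.foldl_cons, List.flatMap_cons]
    by_cases h : P a = true
    · simp [h, ih, List.append_assoc]
    · simp only [Bool.not_eq_true] at h; simp [h, ih]

theorem pv_foldl_attach_if {α β : Type} (l : List α) (P : α → Bool) (F : α → List β) :
    l.attach.foldl (fun res x => if P x.1 then res ++ F x.1 else res) []
      = l.flatMap (fun a => if P a then F a else []) := by
  rw [pv_foldl_if_append l.attach (fun x => P x.1) (fun x => F x.1) [], List.nil_append]
  exact pv_attach_flatMap l (fun a => if P a then F a else [])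

theorem pv_flatMap_congr_mem {α β : Type} {l : List α} {f g : α → List β}
    (h : ∀ a ∈ l, f a = g a) : l.flatMap f = l.flatMap g := by
  simp only [List.flatMap_def]
  rw [List.map_congr_left h]

theorem pvSegs_eq_base (q : String) (ws : PySem.Set String) (start : Nat)
    (h : start = q.toList.length) : pvSegs q ws start = [[]] := by
  rw [pvSegs, if_pos h]

-- unfolding of pvSegs at a non-final position, attach eliminated
theorem pvSegs_of_ne (q : String) (ws : PySem.Set String) (start : Nat)
    (h : ¬ start = q.toList.length) :
    pvSegs q ws start = (List.range (q.toList.length - start)).flatMap (fun j =>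
      let e := start + 1 + j
      let word := PySem.Str.slice q (some (start : Int)) (some (e : Int))
      if ws.contains word then (pvSegs q ws e).map (fun seg => word :: seg) else []) := by
  rw [pvSegs, if_neg h]
  exact pv_attach_flatMap (List.range (q.toList.length - start)) (fun j =>
    let e := start + 1 + j
    let word := PySem.Str.slice q (some (start : Int)) (some (e : Int))
    if ws.contains word then (pvSegs q ws e).map (fun seg => word :: seg) else [])

-- the same for pvDfsA, via the foldl → flatMap lemma
theorem pvDfsA_of_ne (q : String) (ws : PySem.Set String) (start : Nat)
    (h : ¬ start = q.toList.length) :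
    pvDfsA q ws start = (List.range (q.toList.length - start)).flatMap (fun j =>
      let e := start + 1 + j
      let word := PySem.Str.slice q (some (start : Int)) (some (e : Int))
      if ws.contains word then
        (pvDfsA q ws e).map (fun seq => if seq == "" then word else word ++ " " ++ seq)
      else []) := by
  rw [pvDfsA, if_neg h]
  exact pv_foldl_attach_if (List.range (q.toList.length - start))
    (fun j => ws.contains (PySem.Str.slice q (some (start : Int)) (some ((start + 1 + j : Nat) : Int))))
    (fun j => (pvDfsA q ws (start + 1 + j)).map (fun seq =>
      if seq == "" then PySem.Str.slice q (some (start : Int)) (some ((start + 1 + j : Nat) : Int))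
      else PySem.Str.slice q (some (start : Int)) (some ((start + 1 + j : Nat) : Int)) ++ " " ++ seq))

-- every word occurring in a segmentation is a nonempty string
theorem pvSegs_ne_empty (q : String) (ws : PySem.Set String) :
    ∀ d start, q.toList.length - start ≤ d →
      ∀ seg ∈ pvSegs q ws start, ∀ w ∈ seg, w ≠ "" := by
  intro d
  induction d with
  | zero =>
    intro start hd seg hseg w hw
    by_cases h : start = q.toList.length
    · rw [pvSegs_eq_base q ws start h] at hseg
      simp at hseg; subst hseg; simp at hw
    · rw [pvSegs_of_ne q ws start h, Nat.le_zero.mp hd] at hseg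
      simp at hseg
  | succ d ih =>
    intro start hd seg hseg w hw
    by_cases h : start = q.toList.length
    · rw [pvSegs_eq_base q ws start h] at hseg
      simp at hseg; subst hseg; simp at hw
    · rw [pvSegs_of_ne q ws start h] at hseg
      simp only [List.mem_flatMap, List.mem_range] at hseg
      obtain ⟨j, hj, hmem⟩ := hseg
      by_cases hc : ws.contains (PySem.Str.slice q (some (start : Int)) (some ((start + 1 + j : Nat) : Int))) = true
      · rw [if_pos hc] at hmem
        simp only [List.mem_map] at hmem
        obtain ⟨seg', hseg', hcons⟩ := hmem
        rcases List.mem_cons.mp (hcons ▸ hw) with h1 | hw'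
        · -- w is the slice q[start:start+1+j] with start < len, a nonempty string
          subst h1
          intro hwe
          have hlist : ("" : String).toList
              = (q.toList.drop start).take ((start + 1 + j) - start) := by
            conv_lhs => rw [← hwe]
            rw [PySem.Str.toList_slice, PySem.Chars.slice_eq_listSlice,
              PySem.List.slice_natCast]
          have hlen : ((q.toList.drop start).take ((start + 1 + j) - start)).length = 0 := by
            rw [← hlist]; rfl
          rw [List.length_take, List.length_drop] at hlen
          omega
        · exact ih (start + 1 + j) (by omega) seg' hseg' w hw'
      · rw [if_neg hc] at hmem; simp at hmem

theorem pv_join_nil : PySem.Str.join " " ([] : List String) = "" := by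
  apply String.toList_inj.mp
  rw [PySem.Str.toList_join]
  simp [PySem.Chars.join_nil]

theorem pv_join_single (w : String) : PySem.Str.join " " [w] = w := by
  apply String.toList_inj.mp
  rw [PySem.Str.toList_join, List.map_cons, List.map_nil, PySem.Chars.join_singleton]

-- joining with " ": a segmentation whose head word is nonempty joins to a nonempty string
theorem pv_join_ne (s : String) (r : List String) (hs : s ≠ "") :
    PySem.Str.join " " (s :: r) ≠ "" := by
  intro h
  have h' : (PySem.Str.join " " (s :: r)).toList = [] := by rw [h]; rfl
  rw [PySem.Str.toList_join] at h'
  cases r with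
  | nil =>
    rw [List.map_cons, List.map_nil, PySem.Chars.join_singleton] at h'
    exact hs (String.toList_inj.mp h')
  | cons t r' =>
    rw [List.map_cons, List.map_cons, PySem.Chars.join_cons_cons] at h'
    simp at h'

theorem pv_join_cons (w : String) (seg : List String)
    (hhd : ∀ s ∈ seg, s ≠ "") :
    PySem.Str.join " " (w :: seg)
      = if (PySem.Str.join " " seg) == "" then w else w ++ " " ++ PySem.Str.join " " seg := by
  cases seg with
  | nil =>
    rw [pv_join_nil]
    simp only [beq_self_eq_true, if_true]
    exact pv_join_single w
  | cons t r =>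
    have ht : t ≠ "" := hhd t (by simp)
    have hne : PySem.Str.join " " (t :: r) ≠ "" := pv_join_ne t r ht
    rw [if_neg (by simpa using hne)]
    apply String.toList_inj.mp
    rw [PySem.Str.toList_join, List.map_cons, List.map_cons, PySem.Chars.join_cons_cons]
    rw [String.toList_append, String.toList_append, PySem.Str.toList_join]
    rfl

-- A's recursion computes the joined form of pvSegs
theorem pvDfsA_eq_segs (q : String) (ws : PySem.Set String) :
    ∀ d start, q.toList.length - start ≤ d →
      pvDfsA q ws start = (pvSegs q ws start).map (fun seg => PySem.Str.join " " seg) := by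
  intro d
  induction d with
  | zero =>
    intro start hd
    by_cases h : start = q.toList.length
    · rw [pvDfsA, if_pos h, pvSegs_eq_base q ws start h]
      simp [pv_join_nil]
    · rw [pvDfsA_of_ne q ws start h, pvSegs_of_ne q ws start h, Nat.le_zero.mp hd]
      simp
  | succ d ih =>
    intro start hd
    by_cases h : start = q.toList.length
    · rw [pvDfsA, if_pos h, pvSegs_eq_base q ws start h]
      simp [pv_join_nil]
    · rw [pvDfsA_of_ne q ws start h, pvSegs_of_ne q ws start h, List.map_flatMap]
      apply pv_flatMap_congr_mem
      intro j hj
      have hj' : j < q.toList.length - start := List.mem_range.mp hj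
      simp only
      by_cases hc : ws.contains (PySem.Str.slice q (some (start : Int)) (some ((start + 1 + j : Nat) : Int))) = true
      · rw [if_pos hc, if_pos hc, ih (start + 1 + j) (by omega), List.map_map, List.map_map]
        apply List.map_congr_left
        intro seg hseg
        simp only [Function.comp]
        rw [pv_join_cons (PySem.Str.slice q (some (start : Int)) (some ((start + 1 + j : Nat) : Int))) seg
          (fun s hs => pvSegs_ne_empty q ws q.toList.length (start + 1 + j) (by omega) seg hseg s hs)]
      · rw [if_neg hc, if_neg hc]
        simp only [List.map_nil]

-- B's table entry j is pvSegs at position len-k+j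
theorem pvBuildB_eq (q : String) (ws : PySem.Set String) :
    ∀ k, k ≤ q.toList.length →
      pvBuildB q ws k
        = (List.range (k+1)).map (fun j => pvSegs q ws (q.toList.length - k + j)) := by
  intro k
  induction k with
  | zero =>
    intro _
    rw [pvBuildB]
    simp only [zero_add, List.range_one, List.map_cons, List.map_nil, Nat.sub_zero, Nat.add_zero]
    rw [pvSegs_eq_base q ws q.toList.length rfl]
  | succ k ih =>
    intro hk
    have ihk := ih (by omega)
    rw [pvBuildB]
    simp only [List.range_succ_eq_map (n := k+1), List.map_cons, List.map_map, Nat.add_zero]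
    congr 1
    · -- head: the freshly computed row equals pvSegs at start = len-(k+1)
      have hne : ¬ q.toList.length - (k+1) = q.toList.length := by omega
      rw [pvSegs_of_ne q ws (q.toList.length - (k+1)) hne]
      have hrange : q.toList.length - (q.toList.length - (k+1)) = k + 1 := by omega
      rw [hrange]
      apply pv_flatMap_congr_mem
      intro j hj
      have hj' : j < k + 1 := List.mem_range.mp hj
      simp only
      rw [ihk, List.getD_eq_getElem?_getD, List.getElem?_map, List.getElem?_range hj']
      simp only [Option.map_some, Option.getD_some]
      have harg : q.toList.length - k + j = q.toList.length - (k+1) + 1 + j := by omega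
      rw [harg]
    · -- tail: reindexing of the IH table
      rw [ihk]
      apply List.map_congr_left
      intro j hj
      simp only [Function.comp, Nat.succ_eq_add_one]
      congr 1
      omega

-- ===== VERDICT (by name: the statement is the Claim_ definition above) =====
theorem segment_keywords_spec : Claim_equal_segment_keywords := by
  intro user_query marketing_keywords_dictionary _
  unfold Spec_segment_keywords segment_keywords segment_keywords_alt
  simp only
  rw [pvBuildB_eq user_query (PySem.Set.ofList marketing_keywords_dictionary)
    user_query.toList.length (le_refl _)]
  simp only [List.range_succ_eq_map, List.map_cons, List.headD_cons, Nat.sub_self, Nat.add_zero]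
  exact pvDfsA_eq_segs user_query (PySem.Set.ofList marketing_keywords_dictionary)
    user_query.toList.length 0 (by omega)
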